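-- pv_equiv track=rewrite | github.com/AbdullaB1/leetcode | 1880. Check if Word Equals Summation of Two Words.py | isSumEqual
-- ===== SOURCE A (Python) =====
-- def isSumEqual(firstWord: str, secondWord: str, targetWord: str) -> bool:
--     num1 = 0
--     m = 1
--     for i in range(len(firstWord) - 1, -1, -1):
--         num1 += m * (ord(firstWord[i]) - ord('a'))
--         m *= 10
--     num2 = 0
--     m = 1
--     for i in range(len(secondWord) - 1, -1, -1):
--         num2 += m * (ord(secondWord[i]) - ord('a'))
--         m *= 10
--     num3 = 0
--     m = 1
--     for i in range(len(targetWord) - 1, -1, -1):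
--         num3 += m * (ord(targetWord[i]) - ord('a'))
--         m *= 10
--     return num1 + num2 == num3
-- ===== SOURCE B (Python) =====
-- def isSumEqual(firstWord: str, secondWord: str, targetWord: str) -> bool:
--     def value(word):
--         acc = 0
--         i = 0
--         while i < len(word):
--             acc = acc * 10 + (ord(word[i]) - ord('a'))
--             i += 1
--         return acc
--     return value(firstWord) + value(secondWord) == value(targetWord)
-- ===== Notes on version B (the rewrite author's own statement) =====
-- stated objective: simpler
-- what changed: Replaces the three duplicated backward index loops that each maintain an explicit power-of-ten multiplier with one Horner-form index loop (acc = acc*10 + digit) called three times.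
import Mathlib
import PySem

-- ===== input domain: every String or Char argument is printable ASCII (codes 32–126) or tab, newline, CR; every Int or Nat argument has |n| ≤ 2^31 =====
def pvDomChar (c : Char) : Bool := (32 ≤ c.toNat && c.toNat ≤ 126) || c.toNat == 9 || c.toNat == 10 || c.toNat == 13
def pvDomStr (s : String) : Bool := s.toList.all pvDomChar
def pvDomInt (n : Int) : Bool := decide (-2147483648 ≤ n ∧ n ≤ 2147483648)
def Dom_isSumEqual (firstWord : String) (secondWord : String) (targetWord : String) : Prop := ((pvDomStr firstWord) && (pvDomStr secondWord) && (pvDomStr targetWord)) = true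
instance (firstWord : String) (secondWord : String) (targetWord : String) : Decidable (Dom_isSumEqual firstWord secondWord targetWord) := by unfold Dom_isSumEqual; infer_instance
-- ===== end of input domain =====

-- B replaces A's three duplicated backward multiplier loops with one forward Horner-form index loop called three times (simpler; same cost).


-- ===== PORT A =====
-- A iterates i from len-1 down to 0 reading word[i]; that traversal is ported as a fold
-- over the reversed character list carrying the same (num, m) state.
def pvAValue (word : String) : Int :=
  (word.toList.reverse.foldl
    (fun (p : Int × Int) c => (p.1 + p.2 * ((c.toNat : Int) - 97), p.2 * 10)) (0, 1)).1

def isSumEqual (firstWord : String) (secondWord : String) (targetWord : String) : Bool :=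
  pvAValue firstWord + pvAValue secondWord == pvAValue targetWord

-- ===== PORT B =====
-- B's helper value(word): index-based while loop 'while i < len(word)' updating acc = acc*10 + digit,
-- ported as recursion on the index i (terminating because len - i decreases).
def pvBLoop (cs : List Char) (i : Nat) (acc : Int) : Int :=
  if h : i < cs.length then
    pvBLoop cs (i + 1) (acc * 10 + ((cs[i].toNat : Int) - 97))
  else acc
termination_by cs.length - i

def isSumEqual_alt (firstWord : String) (secondWord : String) (targetWord : String) : Bool :=
  pvBLoop firstWord.toList 0 0 + pvBLoop secondWord.toList 0 0 == pvBLoop targetWord.toList 0 0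

-- ===== PRECONDITION & SPEC =====
def Spec_isSumEqual (firstWord : String) (secondWord : String) (targetWord : String) (out : Bool) : Prop := out = isSumEqual_alt firstWord secondWord targetWord
instance (firstWord : String) (secondWord : String) (targetWord : String) (out : Bool) : Decidable (Spec_isSumEqual firstWord secondWord targetWord out) := by unfold Spec_isSumEqual; infer_instance

-- ===== CLAIM (what is proved, stated in full; the proofs are below) =====
def Claim_equal_isSumEqual : Prop := ∀ (firstWord : String) (secondWord : String) (targetWord : String), Dom_isSumEqual firstWord secondWord targetWord → Spec_isSumEqual firstWord secondWord targetWord (isSumEqual firstWord secondWord targetWord)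

-- ===== LEMMAS AND PROOFS =====

-- Proof-side restatement of the Horner value as structural recursion on the character list.
def pvHorner : List Char → Int → Int
  | [], acc => acc
  | c :: rest, acc => pvHorner rest (acc * 10 + ((c.toNat : Int) - 97))

-- B's index loop computes the Horner value of the suffix from index i.
theorem pvBLoop_eq_horner (cs : List Char) (i : Nat) (acc : Int) :
    pvBLoop cs i acc = pvHorner (cs.drop i) acc := by
  induction h : cs.length - i using Nat.strong_induction_on generalizing i acc with
  | _ n ih =>
    unfold pvBLoop
    split
    · next hlt =>
      rw [ih (cs.length - (i + 1)) (by omega) (i + 1) _ rfl]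
      have : cs.drop i = cs[i] :: cs.drop (i + 1) := List.drop_eq_getElem_cons hlt
      rw [this]
      rfl
    · next hge => rw [List.drop_of_length_le (by omega)]; rfl

-- The Horner recursion with a general accumulator: the accumulator factors out as acc * 10^len.
theorem pvHorner_acc (l : List Char) : ∀ (a : Int),
    pvHorner l a = a * 10 ^ l.length + pvHorner l 0 := by
  induction l with
  | nil => intro a; simp [pvHorner]
  | cons c t ih =>
    intro a
    simp only [pvHorner, List.length_cons]
    rw [ih (a * 10 + ((c.toNat : Int) - 97)), ih (0 * 10 + ((c.toNat : Int) - 97))]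
    ring

-- A's backward (num, m) fold, rephrased as a foldr over the forward list, computes (the Horner value, 10^len).
theorem pv_pair_foldr (l : List Char) :
    l.foldr (fun c (p : Int × Int) => (p.1 + p.2 * ((c.toNat : Int) - 97), p.2 * 10)) (0, 1)
      = (pvHorner l 0, 10 ^ l.length) := by
  induction l with
  | nil => simp [pvHorner]
  | cons c t ih =>
    simp only [List.foldr_cons, List.length_cons, ih, pvHorner]
    rw [pvHorner_acc t (0 * 10 + ((c.toNat : Int) - 97))]
    refine Prod.ext ?_ ?_ <;> · show _ = _; ring

theorem pvValue_eq (word : String) : pvAValue word = pvBLoop word.toList 0 0 := by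
  unfold pvAValue
  rw [List.foldl_reverse, pv_pair_foldr word.toList, pvBLoop_eq_horner]
  rfl

-- ===== VERDICT (by name: the statement is the Claim_ definition above) =====
theorem isSumEqual_spec : Claim_equal_isSumEqual := by
  intro f s t _
  unfold Spec_isSumEqual isSumEqual isSumEqual_alt
  rw [pvValue_eq, pvValue_eq, pvValue_eq]
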